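-- pv_equiv track=rewrite | github.com/jubacCH/Nodeglow | backend/services/topology.py | filter_upstream_failures
-- ===== SOURCE A (Python) =====
-- def get_ancestors(topology: dict[int, int | None], host_id: int) -> list[int]:
--     """Get list of ancestor host IDs (parent, grandparent, etc.)."""
--     ancestors = []
--     seen = set()
--     current = host_id
--     while current in topology:
--         parent = topology[current]
--         if parent is None or parent in seen:
--             break
--         ancestors.append(parent)
--         seen.add(parent)
--         current = parent
--     return ancestors
--
-- def filter_upstream_failures(
--     offline_host_ids: set[int],
--     topology: dict[int, int | None],
-- ) -> tuple[set[int], set[int]]: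
--     """Partition offline hosts into primary failures vs cascaded (upstream down).
--
--     Returns (primary_failures, cascaded).
--     """
--     primary = set()
--     cascaded = set()
--
--     for hid in offline_host_ids:
--         ancestors = get_ancestors(topology, hid)
--         if any(a in offline_host_ids for a in ancestors):
--             cascaded.add(hid)
--         else:
--             primary.add(hid)
--
--     return primary, cascaded
-- ===== SOURCE B (Python) =====
-- def filter_upstream_failures(offline_host_ids, topology):
--     """Partition offline hosts into primary failures vs cascaded (upstream down).
--
--     Returns (primary_failures, cascaded).
--
--     Memoizes a per-node 'has an offline ancestor' bit over the parent links
--     (iterative resolution with an explicit stack and cycle detection), so each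
--     topology node is resolved at most once overall.
--     """
--     memo = {}  # host -> bool: some node on its (strict) ancestor chain is offline
--     _MISS = object()
--
--     def resolve(x):
--         stack = []
--         on_stack = {}
--         cur = x
--         memo_get = memo.get
--         topo_get = topology.get
--         on_stack_get = on_stack.get
--         while True:
--             v = memo_get(cur, _MISS)
--             if v is not _MISS:
--                 val = v
--                 break
--             parent = topo_get(cur)
--             if parent is None:
--                 memo[cur] = False
--                 val = False
--                 break
--             i = on_stack_get(cur)
--             if i is not None:
--                 cyc = stack[i:]
--                 val = any(c in offline_host_ids for c in cyc)
--                 for c in cyc: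
--                     memo[c] = val
--                 del stack[i:]
--                 break
--             on_stack[cur] = len(stack)
--             stack.append(cur)
--             cur = parent
--         for s in reversed(stack):
--             val = (cur in offline_host_ids) or val
--             memo[s] = val
--             cur = s
--         return val
--
--     primary = set()
--     cascaded = set()
--     for hid in offline_host_ids:
--         if resolve(hid):
--             cascaded.add(hid)
--         else:
--             primary.add(hid)
--     return primary, cascaded
-- ===== Notes on version B (the rewrite author's own statement) =====
-- stated objective: faster
-- what changed: Instead of re-walking the full ancestor chain for every offline host, B memoizes a per-node 'has an offline ancestor' bit over the parent links (iterative resolution with an explicit stack and cycle detection), so each topology node is resolved once.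
import Mathlib
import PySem

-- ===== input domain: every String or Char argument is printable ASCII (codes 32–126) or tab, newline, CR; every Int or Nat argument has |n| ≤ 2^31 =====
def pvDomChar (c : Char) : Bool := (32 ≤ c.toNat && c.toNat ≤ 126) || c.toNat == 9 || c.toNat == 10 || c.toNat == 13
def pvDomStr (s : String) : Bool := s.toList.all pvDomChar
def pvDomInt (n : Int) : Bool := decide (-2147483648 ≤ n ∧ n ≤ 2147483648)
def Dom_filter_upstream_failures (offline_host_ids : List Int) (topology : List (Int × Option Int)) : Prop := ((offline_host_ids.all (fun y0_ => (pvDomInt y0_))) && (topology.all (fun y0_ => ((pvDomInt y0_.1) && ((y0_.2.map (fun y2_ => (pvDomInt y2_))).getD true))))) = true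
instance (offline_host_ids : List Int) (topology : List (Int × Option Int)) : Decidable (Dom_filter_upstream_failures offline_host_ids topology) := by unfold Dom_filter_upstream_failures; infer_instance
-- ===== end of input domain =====

-- B replaces A's per-host re-walk of the whole ancestor chain by one memoized
-- 'has-an-offline-ancestor' resolution over the parent links (each node resolved once).

-- ===== PORT A =====
-- A's get_ancestors while-loop; fuel is a totality guard only (each iteration adds a
-- fresh parent to `seen` and parents are values of the dict, so |topology|+1 never runs out).
def getAncestorsGo (topology : List (Int × Option Int)) :
    Nat → Int → List Int → PySem.Set Int → List Int
  | 0, _, ancestors, _ => ancestors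
  | fuel+1, current, ancestors, seen =>
    match (PySem.Dict.mk topology).get? current with
    | none => ancestors                                  -- while current in topology: (exit)
    | some none => ancestors                             -- if parent is None: break
    | some (some parent) =>
      if PySem.Set.contains seen parent then ancestors   -- or parent in seen: break
      else getAncestorsGo topology fuel parent (ancestors ++ [parent]) (PySem.Set.add seen parent)

def get_ancestors (topology : List (Int × Option Int)) (host_id : Int) : List Int :=
  getAncestorsGo topology (topology.length + 1) host_id [] PySem.Set.empty

def filter_upstream_failures (offline_host_ids : List Int)
    (topology : List (Int × Option Int)) : List Int × List Int :=
  offline_host_ids.foldl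
    (fun (pc : List Int × List Int) hid =>
      let ancestors := get_ancestors topology hid
      if ancestors.any (fun a => offline_host_ids.contains a) then
        (pc.1, PySem.Set.add pc.2 hid)
      else
        (PySem.Set.add pc.1 hid, pc.2))
    (PySem.Set.empty, PySem.Set.empty)

-- ===== PORT B =====
-- B: `topology.get(cur)` — None for a missing key as well as for a None parent
def bParent (topology : List (Int × Option Int)) (cur : Int) : Option Int :=
  match (PySem.Dict.mk topology).get? cur with
  | some (some p) => some p
  | _ => none

-- B: the unwind loop `for s in reversed(stack): ...`
def bUnwind (offline : List Int) (stack : List Int) (val : Bool)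
    (memo : PySem.Dict Int Bool) (cur : Int) : Bool × PySem.Dict Int Bool :=
  let st := stack.reverse.foldl
    (fun (st : Bool × PySem.Dict Int Bool × Int) s =>
      let v := offline.contains st.2.2 || st.1
      (v, st.2.1.insert s v, s))
    (val, memo, cur)
  (st.1, st.2.1)

-- B: the `while True` resolution loop; fuel is a totality guard only (each non-breaking
-- iteration pushes a fresh node onto the stack, so |topology|+2 never runs out).
def bResolveGo (offline : List Int) (topology : List (Int × Option Int)) :
    Nat → PySem.Dict Int Bool → PySem.Dict Int Int → List Int → Int → Bool × PySem.Dict Int Bool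
  | 0, memo, _, stack, cur => bUnwind offline stack false memo cur
  | fuel+1, memo, on_stack, stack, cur =>
    match memo.get? cur with
    | some v => bUnwind offline stack v memo cur
    | none =>
      match bParent topology cur with
      | none => bUnwind offline stack false (memo.insert cur false) cur
      | some parent =>
        match on_stack.get? cur with
        | some i =>
          let cyc := stack.drop i.toNat
          let val := cyc.any (fun c => offline.contains c)
          let memo2 := cyc.foldl (fun m c => m.insert c val) memo
          bUnwind offline (stack.take i.toNat) val memo2 cur
        | none =>
          bResolveGo offline topology fuel memo
            (on_stack.insert cur (stack.length : Int)) (stack ++ [cur]) parent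

def filter_upstream_failures_alt (offline_host_ids : List Int)
    (topology : List (Int × Option Int)) : List Int × List Int :=
  let st := offline_host_ids.foldl
    (fun (st : List Int × List Int × PySem.Dict Int Bool) hid =>
      let r := bResolveGo offline_host_ids topology (topology.length + 2) st.2.2
                 PySem.Dict.empty [] hid
      if r.1 then (st.1, PySem.Set.add st.2.1 hid, r.2)
      else (PySem.Set.add st.1 hid, st.2.1, r.2))
    (PySem.Set.empty, PySem.Set.empty, PySem.Dict.empty)
  (st.1, st.2.1)

-- ===== PRECONDITION & SPEC =====
def Spec_filter_upstream_failures (offline_host_ids : List Int) (topology : List (Int × Option Int)) (out : List Int × List Int) : Prop := out = filter_upstream_failures_alt offline_host_ids topology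
instance (offline_host_ids : List Int) (topology : List (Int × Option Int)) (out : List Int × List Int) : Decidable (Spec_filter_upstream_failures offline_host_ids topology out) := by unfold Spec_filter_upstream_failures; infer_instance

-- ===== CLAIM (what is proved, stated in full; the proofs are below) =====
def Claim_equal_filter_upstream_failures : Prop := ∀ (offline_host_ids : List Int) (topology : List (Int × Option Int)), Dom_filter_upstream_failures offline_host_ids topology → Spec_filter_upstream_failures offline_host_ids topology (filter_upstream_failures offline_host_ids topology)

-- ===== LEMMAS AND PROOFS =====

-- ghost spec: the n-th node on the parent chain above x (strict for n ≥ 1)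
def pvChain (topology : List (Int × Option Int)) : Nat → Int → Option Int
  | 0, x => some x
  | n+1, x =>
    match bParent topology x with
    | some p => pvChain topology n p
    | none => none

-- ghost spec: "some strict ancestor of x is offline"
def pvSpec (off : List Int) (topology : List (Int × Option Int)) (x : Int) : Prop :=
  ∃ n y, pvChain topology (n+1) x = some y ∧ off.contains y = true

-- all parent values of the topology (the chain after its start lives inside this list)
def pvPV (topology : List (Int × Option Int)) : List Int :=
  topology.filterMap (fun kv => kv.2)

theorem pvChain_succ_right (topo : List (Int × Option Int)) (n : Nat) (x : Int) :
    pvChain topo (n+1) x = (pvChain topo n x).bind (fun y => bParent topo y) := by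
  induction n generalizing x with
  | zero => cases h : bParent topo x <;> simp [pvChain, h]
  | succ n ih =>
    rw [show n+1+1 = (n+1)+1 from rfl]
    cases h : bParent topo x with
    | none =>
      have h1 : pvChain topo ((n+1)+1) x = none := by simp [pvChain, h]
      have h2 : pvChain topo (n+1) x = none := by simp [pvChain, h]
      rw [h1, h2]; rfl
    | some p =>
      have h1 : pvChain topo ((n+1)+1) x = pvChain topo (n+1) p := by
        conv_lhs => rw [pvChain]
        simp [h]
      have h2 : pvChain topo (n+1) x = pvChain topo n p := by simp [pvChain, h]
      rw [h1, h2, ih]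

theorem pvChain_none_mono (topo : List (Int × Option Int)) {n m : Nat} (x : Int)
    (h : pvChain topo n x = none) (hnm : n ≤ m) : pvChain topo m x = none := by
  obtain ⟨k, rfl⟩ := Nat.exists_eq_add_of_le hnm
  induction k with
  | zero => exact h
  | succ k ih => rw [show n + (k+1) = (n+k)+1 from rfl, pvChain_succ_right, ih (by omega)]; rfl

theorem pvChain_repeat (topo : List (Int × Option Int)) {i j : Nat} (x : Int)
    (hij : i < j) (heq : pvChain topo i x = pvChain topo j x) :
    ∀ n, i ≤ n → ∃ m, i ≤ m ∧ m < j ∧ pvChain topo n x = pvChain topo m x := by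
  intro n
  induction n with
  | zero => intro h; exact ⟨0, h, by omega, rfl⟩
  | succ n ih =>
    intro h
    rcases Nat.lt_or_ge n i with hlt | hge
    · have hi : i = n + 1 := by omega
      exact ⟨i, le_refl _, hij, by rw [hi]⟩
    · obtain ⟨m, him, hmj, hm⟩ := ih hge
      rcases Nat.lt_or_ge (m+1) j with h1 | h1
      · exact ⟨m+1, by omega, h1, by rw [pvChain_succ_right, hm, ← pvChain_succ_right]⟩
      · have hmj' : m + 1 = j := by omega
        exact ⟨i, le_refl _, hij,
          by rw [pvChain_succ_right, hm, ← pvChain_succ_right, hmj', ← heq]⟩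

theorem pvSpec_none {off : List Int} {topo : List (Int × Option Int)} {x : Int}
    (h : bParent topo x = none) : ¬ pvSpec off topo x := by
  rintro ⟨n, y, hc, -⟩
  simp [pvChain, h] at hc

theorem pvSpec_step {off : List Int} {topo : List (Int × Option Int)} {x p : Int}
    (h : bParent topo x = some p) :
    pvSpec off topo x ↔ (off.contains p = true ∨ pvSpec off topo p) := by
  constructor
  · rintro ⟨n, y, hc, hy⟩
    cases n with
    | zero => simp [pvChain, h] at hc; subst hc; exact Or.inl hy
    | succ n =>
      have : pvChain topo (n+1) p = some y := by
        have := hc; rw [pvChain] at this; simpa [h] using this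
      exact Or.inr ⟨n, y, this, hy⟩
  · rintro (hp | ⟨n, y, hc, hy⟩)
    · exact ⟨0, p, by simp [pvChain, h], hp⟩
    · exact ⟨n+1, y, by rw [pvChain]; simpa [h] using hc, hy⟩

theorem pvBParent_mem (topo : List (Int × Option Int)) {x p : Int}
    (h : bParent topo x = some p) : p ∈ pvPV topo := by
  unfold bParent at h
  cases hg : (PySem.Dict.mk topo).get? x with
  | none => rw [hg] at h; simp at h
  | some o =>
    cases o with
    | none => rw [hg] at h; simp at h
    | some q =>
      rw [hg] at h; simp only [Option.some.injEq] at h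
      have hm := PySem.Dict.mem_items_of_get?_eq_some (PySem.Dict.mk topo) hg
      exact List.mem_filterMap.mpr ⟨(x, some q), hm, by simp [h]⟩

theorem pvNodup_length_le {l l' : List Int} (h : l.Nodup) (hs : ∀ x ∈ l, x ∈ l') :
    l.length ≤ l'.length :=
  (List.subperm_of_subset h hs).length_le

-- the walk list covers every chain value ⇒ its `any` decides pvSpec
theorem pvAccComplete {off : List Int} {topo : List (Int × Option Int)} {h : Int}
    {acc : List Int}
    (hacc : ∀ j (hj : j < acc.length), pvChain topo (j+1) h = some acc[j])
    (hcover : ∀ n y, pvChain topo (n+1) h = some y → y ∈ acc) :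
    (acc.any (fun a => off.contains a) = true ↔ pvSpec off topo h) := by
  constructor
  · rw [List.any_eq_true]
    rintro ⟨a, ha, hpa⟩
    obtain ⟨j, hj, rfl⟩ := List.mem_iff_getElem.mp ha
    exact ⟨j, _, hacc j hj, hpa⟩
  · rintro ⟨n, y, hc, hy⟩
    rw [List.any_eq_true]
    exact ⟨y, hcover n y hc, hy⟩

theorem pvWalkAny (off : List Int) (topo : List (Int × Option Int)) (h : Int) :
    ∀ (fuel : Nat) (acc : List Int) (cur : Int),
      pvChain topo acc.length h = some cur →
      (∀ j (hj : j < acc.length), pvChain topo (j+1) h = some acc[j]) →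
      acc.Nodup →
      (∀ a ∈ acc, a ∈ pvPV topo) →
      topo.length + 1 ≤ fuel + acc.length →
      ((getAncestorsGo topo fuel cur acc acc).any (fun a => off.contains a) = true
        ↔ pvSpec off topo h) := by
  intro fuel
  induction fuel with
  | zero =>
    intro acc cur hk hacc hnd hpv hfuel
    exfalso
    have h1 := pvNodup_length_le hnd hpv
    have h2 := List.length_filterMap_le (fun kv : Int × Option Int => kv.2) topo
    unfold pvPV at h1
    omega
  | succ fuel ih =>
    intro acc cur hk hacc hnd hpv hfuel
    rw [getAncestorsGo]
    cases hg : (PySem.Dict.mk topo).get? cur with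
    | none =>
      have hbp : bParent topo cur = none := by simp [bParent, hg]
      apply pvAccComplete hacc
      intro n y hc
      rcases Nat.lt_or_ge n acc.length with hn | hn
      · have := hacc n hn
        rw [hc] at this
        simp only [Option.some.injEq] at this
        rw [this]; exact List.getElem_mem hn
      · exfalso
        have hknone : pvChain topo (acc.length + 1) h = none := by
          rw [pvChain_succ_right, hk]; simp [hbp]
        have := pvChain_none_mono topo h hknone (by omega : acc.length + 1 ≤ n + 1)
        rw [hc] at this; simp at this
    | some o =>
      cases o with
      | none =>
        have hbp : bParent topo cur = none := by simp [bParent, hg]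
        apply pvAccComplete hacc
        intro n y hc
        rcases Nat.lt_or_ge n acc.length with hn | hn
        · have := hacc n hn
          rw [hc] at this
          simp only [Option.some.injEq] at this
          rw [this]; exact List.getElem_mem hn
        · exfalso
          have hknone : pvChain topo (acc.length + 1) h = none := by
            rw [pvChain_succ_right, hk]; simp [hbp]
          have := pvChain_none_mono topo h hknone (by omega : acc.length + 1 ≤ n + 1)
          rw [hc] at this; simp at this
      | some p =>
        have hbp : bParent topo cur = some p := by simp [bParent, hg]
        have hkp : pvChain topo (acc.length + 1) h = some p := by
          rw [pvChain_succ_right, hk]; simpa using hbp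
        by_cases hmem : p ∈ acc
        · have hcont : PySem.Set.contains acc p = true :=
            (PySem.Set.contains_iff acc p).mpr hmem
          dsimp only
          rw [if_pos hcont]
          apply pvAccComplete hacc
          intro n y hc
          obtain ⟨i, hi, hip⟩ := List.mem_iff_getElem.mp hmem
          have hieq : pvChain topo (i+1) h = pvChain topo (acc.length+1) h := by
            rw [hkp, hacc i hi, hip]
          rcases Nat.lt_or_ge n acc.length with hn | hn
          · have := hacc n hn
            rw [hc] at this
            simp only [Option.some.injEq] at this
            rw [this]; exact List.getElem_mem hn
          · obtain ⟨m, him, hmk, hm⟩ :=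
              pvChain_repeat topo h (by omega : i+1 < acc.length+1) hieq (n+1) (by omega)
            have hm1 : m - 1 < acc.length := by omega
            have : pvChain topo ((m-1)+1) h = some acc[m-1] := hacc (m-1) hm1
            rw [show (m-1)+1 = m by omega] at this
            rw [hc, this] at hm
            simp only [Option.some.injEq] at hm
            rw [hm]; exact List.getElem_mem hm1
        · have hcont : PySem.Set.contains acc p = false := by
            cases hcc : PySem.Set.contains acc p
            · rfl
            · exact absurd ((PySem.Set.contains_iff acc p).mp hcc) hmem
          dsimp only
          rw [if_neg (fun hcc => hmem ((PySem.Set.contains_iff acc p).mp hcc)),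
            PySem.Set.add_of_not_mem hmem]
          apply ih (acc ++ [p]) p
          · simpa using hkp
          · intro j hj
            simp only [List.length_append, List.length_cons, List.length_nil] at hj
            rcases Nat.lt_or_ge j acc.length with hjl | hjl
            · rw [List.getElem_append_left hjl]
              exact hacc j hjl
            · have hje : j = acc.length := by omega
              rw [List.getElem_concat_length hje]
              rw [hje]
              exact hkp
          · rw [List.nodup_append]
            refine ⟨hnd, by simp, ?_⟩
            intro a ha b hb
            simp only [List.mem_singleton] at hb
            subst hb
            exact fun hab => hmem (hab ▸ ha)
          · intro a ha
            rcases List.mem_append.mp ha with ha | ha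
            · exact hpv a ha
            · simp only [List.mem_singleton] at ha
              subst ha
              exact pvBParent_mem topo hbp
          · simp only [List.length_append, List.length_cons, List.length_nil]
            omega

theorem pvAncAny (off : List Int) (topo : List (Int × Option Int)) (h : Int) :
    ((get_ancestors topo h).any (fun a => off.contains a) = true ↔ pvSpec off topo h) := by
  unfold get_ancestors
  exact pvWalkAny off topo h (topo.length + 1) [] h rfl (by intro j hj; simp at hj)
    List.nodup_nil (by intro a ha; simp at ha) (by simp)

-- ===== B-side =====

def pvInv (off : List Int) (topo : List (Int × Option Int))
    (memo : PySem.Dict Int Bool) : Prop :=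
  ∀ k v, memo.get? k = some v → (v = true ↔ pvSpec off topo k)

theorem pvInv_empty (off : List Int) (topo : List (Int × Option Int)) :
    pvInv off topo PySem.Dict.empty := by
  intro k v hkv
  rw [PySem.Dict.get?_empty] at hkv
  simp at hkv

theorem pvInv_insert {off : List Int} {topo : List (Int × Option Int)}
    {memo : PySem.Dict Int Bool} (hinv : pvInv off topo memo) {c : Int} {v : Bool}
    (hc : v = true ↔ pvSpec off topo c) : pvInv off topo (memo.insert c v) := by
  intro k w hkw
  rw [PySem.Dict.get?_insert] at hkw
  split at hkw
  · rename_i hk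
    subst hk
    simp only [Option.some.injEq] at hkw
    rw [← hkw]
    exact hc
  · exact hinv k w hkw

theorem pvInv_foldl_insert {off : List Int} {topo : List (Int × Option Int)} :
    ∀ (l : List Int) (memo : PySem.Dict Int Bool) (val : Bool),
      pvInv off topo memo → (∀ c ∈ l, (val = true ↔ pvSpec off topo c)) →
      pvInv off topo (l.foldl (fun m c => m.insert c val) memo) := by
  intro l
  induction l with
  | nil => intro memo val hinv _; exact hinv
  | cons c l ih =>
    intro memo val hinv hall
    simp only [List.foldl_cons]
    exact ih _ _ (pvInv_insert hinv (hall c (by simp))) (fun d hd => hall d (by simp [hd]))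

theorem pvBUnwind_nil (off : List Int) (val : Bool) (memo : PySem.Dict Int Bool) (cur : Int) :
    bUnwind off [] val memo cur = (val, memo) := rfl

theorem pvBUnwind_append (off : List Int) (l : List Int) (x : Int) (val : Bool)
    (memo : PySem.Dict Int Bool) (cur : Int) :
    bUnwind off (l ++ [x]) val memo cur =
      bUnwind off l (off.contains cur || val) (memo.insert x (off.contains cur || val)) x := by
  unfold bUnwind
  rw [List.reverse_append]
  simp

theorem pvHeadD_append (l : List Int) (x : Int) (c : Int) :
    (l ++ [x]).headD c = l.headD x := by
  cases l <;> simp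

theorem pvUnwind (off : List Int) (topo : List (Int × Option Int)) :
    ∀ (stack : List Int) (val : Bool) (memo : PySem.Dict Int Bool) (cur : Int),
      (∀ j (hj : j+1 < stack.length), bParent topo stack[j] = some stack[j+1]) →
      (∀ (hne : stack ≠ []), bParent topo (stack.getLast hne) = some cur) →
      (val = true ↔ pvSpec off topo cur) →
      pvInv off topo memo →
      ((bUnwind off stack val memo cur).1 = true ↔ pvSpec off topo (stack.headD cur)) ∧
        pvInv off topo (bUnwind off stack val memo cur).2 := by
  intro stack
  induction stack using List.reverseRecOn with
  | nil =>
    intro val memo cur _ _ hval hinv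
    rw [pvBUnwind_nil]
    exact ⟨hval, hinv⟩
  | append_singleton l x ihl =>
    intro val memo cur hadj hlast hval hinv
    rw [pvBUnwind_append, pvHeadD_append]
    have hbx : bParent topo x = some cur := by
      have := hlast (by simp)
      rwa [List.getLast_concat] at this
    have hval' : (off.contains cur || val) = true ↔ pvSpec off topo x := by
      rw [pvSpec_step hbx, Bool.or_eq_true, hval]
    have hinv' : pvInv off topo (memo.insert x (off.contains cur || val)) :=
      pvInv_insert hinv hval'
    apply ihl _ _ x _ _ hval' hinv'
    · intro j hj
      have hj1 : j + 1 < l.length := by simpa using hj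
      have h2 := hadj j (by simp; omega)
      rw [List.getElem_append_left (by omega : j < l.length),
        List.getElem_append_left hj1] at h2
      exact h2
    · intro hne
      have h0 : 0 < l.length := List.length_pos_of_ne_nil hne
      have h2 := hadj (l.length - 1) (by simp; omega)
      rw [List.getElem_append_left (by omega : l.length - 1 < l.length),
        List.getElem_concat_length (by omega : l.length - 1 + 1 = l.length)] at h2
      rw [List.getLast_eq_getElem]
      exact h2

-- one parent step inside a parent-cycle, as indices mod the cycle length
theorem pvCycleStep {topo : List (Int × Option Int)} {cyc : List Int} (hne : cyc ≠ [])
    (hadj : ∀ j (hj : j+1 < cyc.length), bParent topo cyc[j] = some cyc[j+1])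
    (hlast : bParent topo (cyc.getLast hne) = some (cyc.head hne)) :
    ∀ i (hi : i < cyc.length),
      bParent topo cyc[i] =
        some (cyc[(i+1) % cyc.length]'(Nat.mod_lt _ (List.length_pos_of_ne_nil hne))) := by
  intro i hi
  rcases Nat.lt_or_ge (i+1) cyc.length with h1 | h1
  · simp only [Nat.mod_eq_of_lt h1]
    exact hadj i h1
  · have hieq : i = cyc.length - 1 := by omega
    subst hieq
    have hpos : 0 < cyc.length := List.length_pos_of_ne_nil hne
    have hmod : (cyc.length - 1 + 1) % cyc.length = 0 := by
      rw [Nat.sub_add_cancel hpos, Nat.mod_self]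
    simp only [hmod]
    rw [← List.getLast_eq_getElem hne, ← List.head_eq_getElem hne]
    exact hlast

theorem pvCycleChain {topo : List (Int × Option Int)} {cyc : List Int} (hne : cyc ≠ [])
    (hadj : ∀ j (hj : j+1 < cyc.length), bParent topo cyc[j] = some cyc[j+1])
    (hlast : bParent topo (cyc.getLast hne) = some (cyc.head hne)) :
    ∀ (m i : Nat) (hi : i < cyc.length),
      pvChain topo m cyc[i] =
        some (cyc[(i+m) % cyc.length]'(Nat.mod_lt _ (List.length_pos_of_ne_nil hne))) := by
  intro m
  induction m with
  | zero => intro i hi; simp [pvChain, Nat.mod_eq_of_lt hi]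
  | succ m ih =>
    intro i hi
    have hstep := pvCycleStep hne hadj hlast i hi
    have hpos : 0 < cyc.length := List.length_pos_of_ne_nil hne
    have hidx : ((i+1) % cyc.length + m) % cyc.length = (i + (m+1)) % cyc.length := by
      rw [Nat.mod_add_mod]
      congr 1
      omega
    have hrec := ih ((i+1) % cyc.length) (Nat.mod_lt _ hpos)
    simp only [hidx] at hrec
    rw [pvChain, hstep]
    exact hrec

theorem pvCycleSpec {off : List Int} {topo : List (Int × Option Int)} {cyc : List Int}
    (hne : cyc ≠ [])
    (hadj : ∀ j (hj : j+1 < cyc.length), bParent topo cyc[j] = some cyc[j+1])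
    (hlast : bParent topo (cyc.getLast hne) = some (cyc.head hne)) :
    ∀ c ∈ cyc, (pvSpec off topo c ↔ ∃ d ∈ cyc, off.contains d = true) := by
  have hpos : 0 < cyc.length := List.length_pos_of_ne_nil hne
  intro c hc
  obtain ⟨i, hi, rfl⟩ := List.mem_iff_getElem.mp hc
  constructor
  · rintro ⟨n, y, hchain, hy⟩
    rw [pvCycleChain hne hadj hlast (n+1) i hi] at hchain
    simp only [Option.some.injEq] at hchain
    exact ⟨y, by rw [← hchain]; exact List.getElem_mem _, hy⟩
  · rintro ⟨d, hd, hdoff⟩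
    obtain ⟨j, hj, rfl⟩ := List.mem_iff_getElem.mp hd
    refine ⟨(j + cyc.length - (i+1)) % cyc.length, cyc[j], ?_, hdoff⟩
    rw [pvCycleChain hne hadj hlast _ i hi]
    have hidx : (i + ((j + cyc.length - (i+1)) % cyc.length + 1)) % cyc.length = j := by
      rw [show i + ((j + cyc.length - (i+1)) % cyc.length + 1)
            = (i + 1) + (j + cyc.length - (i+1)) % cyc.length by omega]
      rw [Nat.add_mod_mod]
      rw [show i + 1 + (j + cyc.length - (i+1)) = j + cyc.length by omega]
      rw [Nat.add_mod_right]
      exact Nat.mod_eq_of_lt hj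
    simp only [hidx]

theorem pvResolve (off : List Int) (topo : List (Int × Option Int)) :
    ∀ (fuel : Nat) (memo : PySem.Dict Int Bool) (on_stack : PySem.Dict Int Int)
      (stack : List Int) (cur : Int),
      pvInv off topo memo →
      (∀ j (hj : j+1 < stack.length), bParent topo stack[j] = some stack[j+1]) →
      (∀ (hne : stack ≠ []), bParent topo (stack.getLast hne) = some cur) →
      stack.Nodup →
      on_stack.items = stack.zipIdx.map (fun si => (si.1, (si.2 : Int))) →
      (∀ j (hj : j < stack.length), 0 < j → stack[j] ∈ pvPV topo) →
      topo.length + 2 ≤ fuel + stack.length →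
      ((bResolveGo off topo fuel memo on_stack stack cur).1 = true ↔
          pvSpec off topo (stack.headD cur)) ∧
        pvInv off topo (bResolveGo off topo fuel memo on_stack stack cur).2 := by
  intro fuel
  induction fuel with
  | zero =>
    intro memo on_stack stack cur hinv hadj hlast hnd hos hpv hfuel
    exfalso
    cases stack with
    | nil => simp at hfuel
    | cons s0 tl =>
      have htl : tl.Nodup := (List.nodup_cons.mp hnd).2
      have hsub : ∀ x ∈ tl, x ∈ pvPV topo := by
        intro x hx
        obtain ⟨j, hj, rfl⟩ := List.mem_iff_getElem.mp hx
        have := hpv (j+1) (by simp; omega) (by omega)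
        simpa using this
      have h1 := pvNodup_length_le htl hsub
      have h2 := List.length_filterMap_le (fun kv : Int × Option Int => kv.2) topo
      unfold pvPV at h1
      simp only [List.length_cons] at hfuel
      omega
  | succ fuel ih =>
    intro memo on_stack stack cur hinv hadj hlast hnd hos hpv hfuel
    rw [bResolveGo]
    cases hm : memo.get? cur with
    | some v =>
      exact pvUnwind off topo stack v memo cur hadj hlast (hinv cur v hm) hinv
    | none =>
      cases hbp : bParent topo cur with
      | none =>
        exact pvUnwind off topo stack false (memo.insert cur false) cur hadj hlast
          (by simp [pvSpec_none hbp]) (pvInv_insert hinv (by simp [pvSpec_none hbp]))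
      | some parent =>
        cases hosg : on_stack.get? cur with
        | some i =>
          -- cycle detected: cur sits at stack position n
          have hmemitems : (cur, i) ∈ on_stack.items :=
            PySem.Dict.mem_items_of_get?_eq_some on_stack hosg
          rw [hos] at hmemitems
          obtain ⟨⟨a, n⟩, hmemz, heq⟩ := List.mem_map.mp hmemitems
          simp only [Prod.mk.injEq] at heq
          obtain ⟨ha, hni⟩ := heq
          obtain ⟨-, hn, hcur0⟩ := List.mem_zipIdx hmemz
          simp only [Nat.zero_add, Nat.sub_zero] at hn hcur0
          have hcur : cur = stack[n] := by rw [← ha]; exact hcur0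
          have hitn : i.toNat = n := by rw [← hni]; simp
          dsimp only
          rw [hitn]
          have hdl : (stack.drop n).length = stack.length - n := List.length_drop
          have hdne : stack.drop n ≠ [] := by
            apply List.ne_nil_of_length_pos; omega
          have hdadj : ∀ j (hj : j+1 < (stack.drop n).length),
              bParent topo (stack.drop n)[j] = some (stack.drop n)[j+1] := by
            intro j hj
            rw [List.getElem_drop, List.getElem_drop]
            have h2 := hadj (n+j) (by omega)
            simpa [show n + (j+1) = n + j + 1 by omega] using h2
          have hdlast : bParent topo ((stack.drop n).getLast hdne)
              = some ((stack.drop n).head hdne) := by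
            rw [List.getLast_eq_getElem, List.head_eq_getElem]
            rw [List.getElem_drop, List.getElem_drop]
            have hsne : stack ≠ [] := by apply List.ne_nil_of_length_pos; omega
            have h2 := hlast hsne
            rw [List.getLast_eq_getElem] at h2
            have hidx : n + ((stack.drop n).length - 1) = stack.length - 1 := by
              rw [hdl]; omega
            simp only [hidx, Nat.add_zero]
            rw [h2, hcur]
          have hcurmem : cur ∈ stack.drop n := by
            rw [hcur]
            have : (stack.drop n)[0]'(by omega) = stack[n] := by
              simp [List.getElem_drop]
            rw [← this]
            exact List.getElem_mem _
          have hcyc := pvCycleSpec (off := off) hdne hdadj hdlast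
          have hvaliff : ((stack.drop n).any fun c => off.contains c) = true
              ↔ pvSpec off topo cur := by
            rw [List.any_eq_true, hcyc cur hcurmem]
          have hinv2 : pvInv off topo ((stack.drop n).foldl
              (fun m c => m.insert c ((stack.drop n).any fun c => off.contains c)) memo) := by
            apply pvInv_foldl_insert _ _ _ hinv
            intro c hc
            rw [List.any_eq_true, hcyc c hc]
          have htake : (stack.take n).length = n := by
            rw [List.length_take]; omega
          have htadj : ∀ j (hj : j+1 < (stack.take n).length),
              bParent topo (stack.take n)[j] = some (stack.take n)[j+1] := by
            intro j hj
            rw [List.getElem_take, List.getElem_take]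
            exact hadj j (by omega)
          have htlast : ∀ (hne' : stack.take n ≠ []),
              bParent topo ((stack.take n).getLast hne') = some cur := by
            intro hne'
            have hn0 : 0 < n := by
              by_contra h0
              have : n = 0 := by omega
              subst this
              simp at hne'
            rw [List.getLast_eq_getElem]
            rw [List.getElem_take]
            have h2 := hadj (n-1) (by omega)
            simp only [show n - 1 + 1 = n from by omega] at h2
            simp only [htake]
            rw [h2, hcur]
          have hmain := pvUnwind off topo (stack.take n)
            ((stack.drop n).any fun c => off.contains c) _ cur htadj htlast hvaliff hinv2
          have hhd : (stack.take n).headD cur = stack.headD cur := by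
            cases stack with
            | nil => simp at hn
            | cons s0 tl =>
              cases n with
              | zero =>
                simp only [List.take_zero, List.headD_nil, List.headD_cons]
                simpa using hcur
              | succ n' => simp [List.take_succ_cons]
          rw [hhd] at hmain
          exact hmain
        | none =>
          -- push cur and follow its parent
          have hkeys : on_stack.keys
              = (stack.zipIdx.map (fun si : Int × Nat => (si.1, (si.2 : Int)))).map Prod.fst := by
            rw [PySem.Dict.keys, hos]
          have hzf : (stack.zipIdx.map (fun si : Int × Nat => (si.1, (si.2 : Int)))).map
              Prod.fst = stack := by
            rw [List.map_map]
            show stack.zipIdx.map Prod.fst = stack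
            simp
          have hnotmem : cur ∉ stack := by
            intro hcurmem
            rw [PySem.Dict.get?_eq_none_iff_not_mem_keys] at hosg
            apply hosg
            rw [hkeys, hzf]
            exact hcurmem
          have hcont : on_stack.contains cur = false := by
            cases hcc : on_stack.contains cur
            · rfl
            · exfalso
              rw [PySem.Dict.get?_eq_none_iff_not_mem_keys] at hosg
              exact hosg ((PySem.Dict.contains_iff_mem_keys on_stack cur).mp hcc)
          have hcurpv : stack ≠ [] → cur ∈ pvPV topo := by
            intro hsne
            exact pvBParent_mem topo (hlast hsne)
          have hres := ih memo (on_stack.insert cur (stack.length : Int)) (stack ++ [cur])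
            parent hinv
            (by
              intro j hj
              simp only [List.length_append, List.length_cons, List.length_nil] at hj
              rcases Nat.lt_or_ge (j+1) stack.length with hlt | hge
              · have h2 := hadj j hlt
                rw [← List.getElem_append_left (by omega : j < stack.length)
                    (h' := by simp; omega),
                  ← List.getElem_append_left hlt (h' := by simp; omega)] at h2
                exact h2
              · have hje : j + 1 = stack.length := by omega
                have hsne : stack ≠ [] := by
                  apply List.ne_nil_of_length_pos; omega
                have h2 := hlast hsne
                rw [List.getLast_eq_getElem] at h2
                rw [List.getElem_append_left (by omega : j < stack.length),
                  List.getElem_concat_length hje]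
                simp only [show j = stack.length - 1 from by omega]
                exact h2)
            (by
              intro hne
              rw [List.getLast_concat]
              exact hbp)
            (by
              rw [List.nodup_append]
              refine ⟨hnd, by simp, ?_⟩
              intro a ha b hb
              simp only [List.mem_singleton] at hb
              subst hb
              exact fun hab => hnotmem (hab ▸ ha))
            (by
              rw [PySem.Dict.items_insert_of_not_contains on_stack _ hcont, hos,
                List.zipIdx_append]
              simp)
            (by
              intro j hj hj0
              simp only [List.length_append, List.length_cons, List.length_nil] at hj
              rcases Nat.lt_or_ge j stack.length with hlt | hge
              · rw [List.getElem_append_left hlt]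
                exact hpv j hlt hj0
              · have hje : j = stack.length := by omega
                rw [List.getElem_concat_length hje]
                apply hcurpv
                apply List.ne_nil_of_length_pos
                omega)
            (by simp only [List.length_append, List.length_cons, List.length_nil]; omega)
          rw [pvHeadD_append] at hres
          exact hres

theorem pvFold (off : List Int) (topo : List (Int × Option Int)) :
    ∀ (l : List Int) (pa ca : List Int) (memo : PySem.Dict Int Bool),
      pvInv off topo memo →
      (l.foldl
        (fun (pc : List Int × List Int) hid =>
          let ancestors := get_ancestors topo hid
          if ancestors.any (fun a => off.contains a) then
            (pc.1, PySem.Set.add pc.2 hid)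
          else
            (PySem.Set.add pc.1 hid, pc.2)) (pa, ca)) =
      ((l.foldl
        (fun (st : List Int × List Int × PySem.Dict Int Bool) hid =>
          let r := bResolveGo off topo (topo.length + 2) st.2.2 PySem.Dict.empty [] hid
          if r.1 then (st.1, PySem.Set.add st.2.1 hid, r.2)
          else (PySem.Set.add st.1 hid, st.2.1, r.2)) (pa, ca, memo)).1,
       (l.foldl
        (fun (st : List Int × List Int × PySem.Dict Int Bool) hid =>
          let r := bResolveGo off topo (topo.length + 2) st.2.2 PySem.Dict.empty [] hid
          if r.1 then (st.1, PySem.Set.add st.2.1 hid, r.2)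
          else (PySem.Set.add st.1 hid, st.2.1, r.2)) (pa, ca, memo)).2.1) := by
  intro l
  induction l with
  | nil => intro pa ca memo _; rfl
  | cons hid l ih =>
    intro pa ca memo hinv
    have hres := pvResolve off topo (topo.length + 2) memo PySem.Dict.empty [] hid hinv
      (by intro j hj; simp at hj) (by intro hne; exact absurd rfl hne) List.nodup_nil
      (by rfl) (by intro j hj; simp at hj) (by simp)
    have hbit : ((get_ancestors topo hid).any (fun a => off.contains a)) =
        (bResolveGo off topo (topo.length + 2) memo PySem.Dict.empty [] hid).1 := by
      rw [Bool.eq_iff_iff, pvAncAny off topo hid]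
      exact (hres.1).symm
    simp only [List.foldl_cons]
    rw [← hbit]
    cases hb : (get_ancestors topo hid).any (fun a => off.contains a)
    · rw [if_neg Bool.false_ne_true, if_neg Bool.false_ne_true]
      exact ih (PySem.Set.add pa hid) ca _ hres.2
    · rw [if_pos rfl, if_pos rfl]
      exact ih pa (PySem.Set.add ca hid) _ hres.2

-- ===== VERDICT (by name: the statement is the Claim_ definition above) =====
theorem filter_upstream_failures_spec : Claim_equal_filter_upstream_failures := by
  intro off topo _
  unfold Spec_filter_upstream_failures
  unfold filter_upstream_failures filter_upstream_failures_alt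
  exact pvFold off topo off PySem.Set.empty PySem.Set.empty PySem.Dict.empty
    (pvInv_empty off topo)
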